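-- pv_equiv track=rewrite | github.com/narpfel/adventofcode | 2025/01/solution.py | part_2
-- ===== SOURCE A (Python) =====
-- def part_2(rotations):
--     position = 50
--     was_zero = 0
--     for rotation in rotations:
--         direction = -1 if rotation < 0 else 1
--         for _ in range(abs(rotation)):
--             position += direction
--             position %= 100
--             if position == 0:
--                 was_zero += 1
--     return was_zero
-- ===== SOURCE B (Python) =====
-- def part_2(rotations):
--     position = 50
--     was_zero = 0
--     for rotation in rotations:
--         k = abs(rotation)
--         if rotation < 0:
--             was_zero += (k + (-position) % 100) // 100
--             position = (position - k) % 100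
--         else:
--             was_zero += (k + position % 100) // 100
--             position = (position + k) % 100
--     return was_zero
-- ===== Notes on version B (the rewrite author's own statement) =====
-- stated objective: faster
-- what changed: Replaces A's step-by-step unary simulation of every rotation (inner loop over abs(rotation)) with a closed-form arithmetic count of zero crossings per rotation using // and %.
import Mathlib
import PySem

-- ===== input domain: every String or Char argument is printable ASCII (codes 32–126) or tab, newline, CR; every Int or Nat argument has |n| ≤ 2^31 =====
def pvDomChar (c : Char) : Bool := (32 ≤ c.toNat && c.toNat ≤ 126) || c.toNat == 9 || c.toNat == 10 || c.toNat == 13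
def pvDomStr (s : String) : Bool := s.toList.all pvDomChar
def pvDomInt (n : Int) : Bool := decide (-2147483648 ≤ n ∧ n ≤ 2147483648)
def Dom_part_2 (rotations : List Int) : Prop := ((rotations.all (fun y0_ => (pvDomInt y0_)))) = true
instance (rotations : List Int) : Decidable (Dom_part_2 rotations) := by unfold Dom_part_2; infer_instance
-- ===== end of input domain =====

-- B replaces A's unary step-by-step simulation of each rotation by a closed-form
-- count of zero crossings per rotation (O(n) instead of O(sum |rotation|)); faster asymptotically.

-- ===== PORT A =====
-- one inner-loop iteration of A: position += direction; position %= 100; count zero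
def pvStepA (direction : Int) (s : Int × Int) : Int × Int :=
  let position := PySem.Int.mod (s.1 + direction) 100
  (position, if position = 0 then s.2 + 1 else s.2)

def part_2 (rotations : List Int) : Int :=
  (rotations.foldl (fun (s : Int × Int) rotation =>
      let direction : Int := if rotation < 0 then -1 else 1
      (List.range rotation.natAbs).foldl (fun s _ => pvStepA direction s) s)
    (50, 0)).2

-- ===== PORT B =====
def part_2_alt (rotations : List Int) : Int :=
  (rotations.foldl (fun (s : Int × Int) rotation =>
      let k : Int := |rotation|
      if rotation < 0 then
        (PySem.Int.mod (s.1 - k) 100,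
         s.2 + PySem.Int.floordiv (k + PySem.Int.mod (-s.1) 100) 100)
      else
        (PySem.Int.mod (s.1 + k) 100,
         s.2 + PySem.Int.floordiv (k + PySem.Int.mod s.1 100) 100))
    (50, 0)).2

-- ===== PRECONDITION & SPEC =====
def Spec_part_2 (rotations : List Int) (out : Int) : Prop := out = part_2_alt rotations
instance (rotations : List Int) (out : Int) : Decidable (Spec_part_2 rotations out) := by unfold Spec_part_2; infer_instance

-- ===== CLAIM (what is proved, stated in full; the proofs are below) =====
def Claim_equal_part_2 : Prop := ∀ (rotations : List Int), Dom_part_2 rotations → Spec_part_2 rotations (part_2 rotations)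

-- ===== LEMMAS AND PROOFS =====

theorem pv_mod100 (a : Int) : PySem.Int.mod a 100 = a % 100 :=
  PySem.Int.mod_eq_emod_of_pos (by norm_num)

theorem pv_div100 (a : Int) : PySem.Int.floordiv a 100 = a / 100 :=
  PySem.Int.floordiv_eq_ediv_of_pos (by norm_num)

-- k steps of +1 from a normalised position: closed form
theorem stepA_pos (k : Nat) : ∀ (p w : Int), 0 ≤ p → p < 100 →
    (List.range k).foldl (fun s _ => pvStepA 1 s) (p, w)
      = ((p + k) % 100, w + (p + k) / 100) := by
  induction k with
  | zero =>
    intro p w h0 h1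
    simp only [List.range_zero, List.foldl_nil, Nat.cast_zero, add_zero]
    have : p % 100 = p := by omega
    have : p / 100 = 0 := by omega
    simp_all
  | succ k ih =>
    intro p w h0 h1
    rw [List.range_succ, List.foldl_append, ih p w h0 h1]
    simp only [List.foldl_cons, List.foldl_nil, pvStepA, pv_mod100]
    push_cast
    rw [Prod.mk.injEq]
    refine ⟨by omega, ?_⟩
    split <;> omega

-- k steps of -1 from a normalised position: closed form
theorem stepA_neg (k : Nat) : ∀ (p w : Int), 0 ≤ p → p < 100 →
    (List.range k).foldl (fun s _ => pvStepA (-1) s) (p, w)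
      = ((p - k) % 100, w + (k + (-p) % 100) / 100) := by
  induction k with
  | zero =>
    intro p w h0 h1
    simp only [List.range_zero, List.foldl_nil, Nat.cast_zero, sub_zero, zero_add]
    have : p % 100 = p := by omega
    have : (-p) % 100 / 100 = 0 := by omega
    simp_all
  | succ k ih =>
    intro p w h0 h1
    rw [List.range_succ, List.foldl_append, ih p w h0 h1]
    simp only [List.foldl_cons, List.foldl_nil, pvStepA, pv_mod100]
    push_cast
    rw [Prod.mk.injEq]
    refine ⟨by omega, ?_⟩
    split <;> omega

-- the two per-rotation body functions agree and preserve 0 ≤ position < 100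
theorem fold_agree (rotations : List Int) : ∀ (p w : Int), 0 ≤ p → p < 100 →
    rotations.foldl (fun (s : Int × Int) rotation =>
        List.foldl (fun s _ => pvStepA (if rotation < 0 then -1 else 1) s) s
          (List.range rotation.natAbs)) (p, w)
    = rotations.foldl (fun (s : Int × Int) rotation =>
        if rotation < 0 then
          ((s.1 - |rotation|) % 100, s.2 + (|rotation| + -s.1 % 100) / 100)
        else
          ((s.1 + |rotation|) % 100, s.2 + (|rotation| + s.1 % 100) / 100)) (p, w) := by
  induction rotations with
  | nil => intro p w _ _; rfl
  | cons rot rest ih =>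
    intro p w h0 h1
    simp only [List.foldl_cons]
    by_cases hneg : rot < 0
    · rw [if_pos hneg, if_pos hneg, stepA_neg rot.natAbs p w h0 h1,
        show |rot| = ((rot.natAbs : Int)) from Int.abs_eq_natAbs rot]
      exact ih _ _ (Int.emod_nonneg _ (by norm_num)) (Int.emod_lt_of_pos _ (by norm_num))
    · rw [if_neg hneg, if_neg hneg, stepA_pos rot.natAbs p w h0 h1,
        show |rot| = ((rot.natAbs : Int)) from Int.abs_eq_natAbs rot,
        show p % 100 = p from by omega,
        show ((rot.natAbs : Int)) + p = p + ((rot.natAbs : Int)) from by ring]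
      exact ih _ _ (Int.emod_nonneg _ (by norm_num)) (Int.emod_lt_of_pos _ (by norm_num))

-- ===== VERDICT (by name: the statement is the Claim_ definition above) =====
theorem part_2_spec : Claim_equal_part_2 := by
  intro rotations _
  unfold Spec_part_2 part_2 part_2_alt
  simp only [pv_mod100, pv_div100]
  rw [fold_agree rotations 50 0 (by norm_num) (by norm_num)]
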